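-- pv_equiv track=rewrite | github.com/UARR7/Project-Work-1 | docs_generator.py | _extract_java_javadoc
-- ===== SOURCE A (Python) =====
-- from typing import Dict, List, Optional, Any
--
-- def _extract_java_javadoc(lines: List[str], line_index: int) -> str:
--     """Extract Java Javadoc comment"""
--     comment = ''
--     # Look for Javadoc above the method/class
--     for i in range(max(0, line_index - 10), line_index):
--         line = lines[i].strip()
--         if line.startswith('/**'):
--             # Start of Javadoc
--             comment_lines = []
--             for j in range(i, line_index):
--                 comment_lines.append(lines[j])
--                 if '*/' in lines[j]:
--                     break
--             comment = '\n'.join(comment_lines)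
--             break
--     return comment
-- ===== SOURCE B (Python) =====
-- def _extract_java_javadoc(lines, line_index):
--     """Extract Java Javadoc comment (single linear pass with an in_comment flag)."""
--     start = max(0, line_index - 10)
--     end = max(0, line_index)
--     collected = []
--     in_comment = False
--     for raw in lines[start:end]:
--         if in_comment:
--             collected.append(raw)
--             if '*/' in raw:
--                 break
--         elif raw.strip().startswith('/**'):
--             collected.append(raw)
--             if '*/' in raw:
--                 break
--             in_comment = True
--     return '\n'.join(collected)
-- ===== Notes on version B (the rewrite author's own statement) =====
-- stated objective: simpler
-- what changed: Replaces the nested find-then-collect (outer scan for '/**' plus an inner re-scan from that index) with one linear pass over the 10-line window using an in_comment flag, so no line is visited twice and no index arithmetic remains.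
-- outside the precondition, e.g. on _extract_java_javadoc(['/** x */'], 5): A returns '/** x */', B returns '/** x */'
import Mathlib
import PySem

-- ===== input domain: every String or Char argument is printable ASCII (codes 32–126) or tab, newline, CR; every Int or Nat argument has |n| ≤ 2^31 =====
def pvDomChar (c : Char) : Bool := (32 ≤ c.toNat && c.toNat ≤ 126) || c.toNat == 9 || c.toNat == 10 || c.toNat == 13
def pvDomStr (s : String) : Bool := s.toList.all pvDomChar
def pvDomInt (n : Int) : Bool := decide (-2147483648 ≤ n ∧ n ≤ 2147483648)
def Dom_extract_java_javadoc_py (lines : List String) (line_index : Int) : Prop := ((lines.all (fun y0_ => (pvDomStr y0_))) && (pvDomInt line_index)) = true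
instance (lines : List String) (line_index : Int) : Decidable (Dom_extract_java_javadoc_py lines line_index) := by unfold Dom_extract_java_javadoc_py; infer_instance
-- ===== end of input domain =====

-- B replaces A's nested find-then-collect with one linear pass over the window using an
-- in_comment flag (objective: simpler — each line is visited once, no index arithmetic).

-- ===== PORT A =====
-- inner loop: for j in range(i, line_index): comment_lines.append(lines[j]); if '*/' in lines[j]: break
def aInner (lines : List String) : List Int → List String → List String
  | [], acc => acc.reverse
  | j :: js, acc =>
    let lj := PySem.List.pyGetD lines j ""
    if PySem.Str.isIn "*/" lj then (lj :: acc).reverse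
    else aInner lines js (lj :: acc)

-- outer loop: for i in range(max(0, line_index-10), line_index): … break after the first '/**' line
def aOuter (lines : List String) (line_index : Int) : List Int → String
  | [] => ""
  | i :: is =>
    let line := PySem.Str.strip (PySem.List.pyGetD lines i "")
    if PySem.Str.startswith line "/**" then
      PySem.Str.join "\n" (aInner lines (PySem.List.pyRange i line_index 1) [])
    else aOuter lines line_index is

def extract_java_javadoc_py (lines : List String) (line_index : Int) : String :=
  aOuter lines line_index (PySem.List.pyRange (max 0 (line_index - 10)) line_index 1)

-- ===== PORT B =====
-- single pass over the slice with an in_comment flag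
def bGo : List String → Bool → List String → List String
  | [], _, acc => acc.reverse
  | raw :: rest, true, acc =>
    if PySem.Str.isIn "*/" raw then (raw :: acc).reverse
    else bGo rest true (raw :: acc)
  | raw :: rest, false, acc =>
    if PySem.Str.startswith (PySem.Str.strip raw) "/**" then
      if PySem.Str.isIn "*/" raw then (raw :: acc).reverse
      else bGo rest true (raw :: acc)
    else bGo rest false acc

def extract_java_javadoc_py_alt (lines : List String) (line_index : Int) : String :=
  let window := PySem.List.slice lines (some (max 0 (line_index - 10))) (some (max 0 line_index))
  PySem.Str.join "\n" (bGo window false [])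

-- ===== PRECONDITION & SPEC =====
-- Pre_ excludes line_index > len(lines): there A indexes lines[i] past the end and raises
-- IndexError unless a closed '/**…*/' block happens to make it break early; such inputs are
-- outside the natural domain (line_index is an index into lines).
def Pre_extract_java_javadoc_py (lines : List String) (line_index : Int) : Prop :=
  line_index ≤ (lines.length : Int)
instance (lines : List String) (line_index : Int) : Decidable (Pre_extract_java_javadoc_py lines line_index) := by unfold Pre_extract_java_javadoc_py; infer_instance

def pvWitness_extract_java_javadoc_py : List String × Int := (["/** doc */", "int f(){}"], 1)

def Spec_extract_java_javadoc_py (lines : List String) (line_index : Int) (out : String) : Prop := out = extract_java_javadoc_py_alt lines line_index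
instance (lines : List String) (line_index : Int) (out : String) : Decidable (Spec_extract_java_javadoc_py lines line_index out) := by unfold Spec_extract_java_javadoc_py; infer_instance

-- ===== CLAIM (what is proved, stated in full; the proofs are below) =====
def Claim_equal_extract_java_javadoc_py : Prop := ∀ (lines : List String) (line_index : Int), Dom_extract_java_javadoc_py lines line_index → Pre_extract_java_javadoc_py lines line_index → Spec_extract_java_javadoc_py lines line_index (extract_java_javadoc_py lines line_index)

-- ===== LEMMAS AND PROOFS =====

-- a slice with in-range Int bounds uncoils one element at a time
theorem slice_cons_of_lt {α : Type} (xs : List α) (s e : Int) (d : α) (hs : 0 ≤ s) (hse : s < e)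
    (he : e ≤ (xs.length : Int)) :
    PySem.List.slice xs (some s) (some e)
      = PySem.List.pyGetD xs s d :: PySem.List.slice xs (some (s + 1)) (some e) := by
  have hsl : s.toNat < xs.length := by omega
  rw [PySem.List.slice_toNat xs hs (by omega),
      PySem.List.slice_toNat xs (by omega : (0:Int) ≤ s + 1) (by omega : (0:Int) ≤ e),
      PySem.List.pyGetD_eq_getElem xs d hs (by omega),
      List.drop_eq_getElem_cons hsl]
  have h1 : (s + 1).toNat = s.toNat + 1 := by omega
  have h2 : e.toNat - s.toNat = (e.toNat - (s + 1).toNat) + 1 := by omega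
  rw [h2, List.take_succ_cons, h1]

theorem slice_nil_of_le {α : Type} (xs : List α) (s e : Int) (hs : 0 ≤ s) (he : 0 ≤ e)
    (hse : e ≤ s) : PySem.List.slice xs (some s) (some e) = [] := by
  rw [PySem.List.slice_toNat xs hs he]
  have : e.toNat - s.toNat = 0 := by omega
  simp [this]

theorem inner_eq (lines : List String) (e : Int) (he : e ≤ (lines.length : Int)) (he0 : 0 ≤ e) :
    ∀ (n : Nat) (s : Int), 0 ≤ s → (e - s).toNat = n → ∀ acc,
      aInner lines (PySem.List.pyRange s e 1) acc
        = bGo (PySem.List.slice lines (some s) (some e)) true acc := by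
  intro n
  induction n with
  | zero =>
    intro s hs hn acc
    rw [PySem.List.pyRange_one_eq_nil (by omega), slice_nil_of_le lines s e hs he0 (by omega)]
    simp [aInner, bGo]
  | succ n ih =>
    intro s hs hn acc
    have hse : s < e := by omega
    rw [PySem.List.pyRange_one_cons hse, slice_cons_of_lt lines s e "" hs hse he]
    simp only [aInner, bGo]
    split_ifs with h
    · rfl
    · exact ih (s + 1) (by omega) (by omega) _

theorem outer_eq (lines : List String) (e : Int) (he : e ≤ (lines.length : Int)) (he0 : 0 ≤ e) :
    ∀ (n : Nat) (s : Int), 0 ≤ s → (e - s).toNat = n →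
      aOuter lines e (PySem.List.pyRange s e 1)
        = PySem.Str.join "\n" (bGo (PySem.List.slice lines (some s) (some e)) false []) := by
  intro n
  induction n with
  | zero =>
    intro s hs hn
    rw [PySem.List.pyRange_one_eq_nil (by omega), slice_nil_of_le lines s e hs he0 (by omega)]
    simp only [aOuter, bGo]
    decide
  | succ n ih =>
    intro s hs hn
    have hse : s < e := by omega
    rw [PySem.List.pyRange_one_cons hse, slice_cons_of_lt lines s e "" hs hse he]
    simp only [aOuter, bGo]
    split_ifs with h1 h2
    · -- '/**' found and '*/' on the same line
      rw [PySem.List.pyRange_one_cons hse]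
      simp only [aInner, h2]
      rfl
    · -- '/**' found, collect until '*/'
      rw [PySem.List.pyRange_one_cons hse]
      simp only [aInner, h2, Bool.false_eq_true, if_false]
      exact congrArg (PySem.Str.join "\n") (inner_eq lines e he he0 _ (s + 1) (by omega) rfl _)
    · exact ih (s + 1) (by omega) (by omega)

-- ===== VERDICT (by name: the statement is the Claim_ definition above) =====
theorem extract_java_javadoc_py_spec : Claim_equal_extract_java_javadoc_py := by
  intro lines li hdom hpre
  unfold Spec_extract_java_javadoc_py extract_java_javadoc_py extract_java_javadoc_py_alt
  rcases (by omega : li ≤ 0 ∨ 0 ≤ li) with hle | hge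
  · have h1 : max (0:Int) li = 0 := by omega
    rw [h1, PySem.List.pyRange_one_eq_nil (by omega),
        slice_nil_of_le lines _ 0 (by omega) (by omega) (by omega)]
    simp only [aOuter, bGo]
    decide
  · have h1 : max (0:Int) li = li := by omega
    rw [h1]
    exact outer_eq lines li hpre hge _ (max 0 (li - 10)) (by omega) rfl
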